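-- pv_equiv track=rewrite | github.com/ridersw/Leetcode-Problems | countAnalogousArrays.py | countAnalogousArrays
-- ===== SOURCE A (Python) =====
-- def countAnalogousArrays(consecutiveDifference , lowerBound , upperBound):
--
--     maxdiff = float('-inf')
--     mindiff = float('inf')
--     runningsum = 0
--     if len(consecutiveDifference) == 0:
--         return 0
--
--     if upperBound < lowerBound :
--         return 0
--
--     for diff in consecutiveDifference:
--         runningsum+=diff
--         if runningsum > maxdiff:
--             maxdiff = runningsum
--
--         if runningsum < mindiff:
--             mindiff = runningsum
--
--     maxvalidupperbound = upperBound + mindiff if upperBound+mindiff < upperBound else upperBound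
--     minvalidlowerbound = lowerBound + maxdiff if lowerBound + maxdiff > lowerBound else lowerBound
--
--     if maxvalidupperbound >= minvalidlowerbound:
--         return maxvalidupperbound - minvalidlowerbound + 1
--     else:
--         return 0
-- ===== SOURCE B (Python) =====
-- def countAnalogousArrays(consecutiveDifference, lowerBound, upperBound):
--     if not consecutiveDifference:
--         return 0
--     # Walk the differences back-to-front, maintaining the feasible interval
--     # [lo, hi] for the value at the current position: the last value may be
--     # anything in [lowerBound, upperBound]; a value before difference d is
--     # next + d, and must itself lie within the bounds.
--     lo, hi = lowerBound, upperBound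
--     for d in reversed(consecutiveDifference):
--         lo = max(lowerBound, lo + d)
--         hi = min(upperBound, hi + d)
--     return max(0, hi - lo + 1)
-- ===== Notes on version B (the rewrite author's own statement) =====
-- stated objective: alternative
-- what changed: Instead of a forward scan tracking the min/max of the running prefix sums followed by clamping arithmetic and a range-count branch, B walks the differences back-to-front maintaining the feasible interval [lo,hi] for the current array value (intersecting with [lowerBound,upperBound] at each step) and returns max(0, hi-lo+1).
import Mathlib
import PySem

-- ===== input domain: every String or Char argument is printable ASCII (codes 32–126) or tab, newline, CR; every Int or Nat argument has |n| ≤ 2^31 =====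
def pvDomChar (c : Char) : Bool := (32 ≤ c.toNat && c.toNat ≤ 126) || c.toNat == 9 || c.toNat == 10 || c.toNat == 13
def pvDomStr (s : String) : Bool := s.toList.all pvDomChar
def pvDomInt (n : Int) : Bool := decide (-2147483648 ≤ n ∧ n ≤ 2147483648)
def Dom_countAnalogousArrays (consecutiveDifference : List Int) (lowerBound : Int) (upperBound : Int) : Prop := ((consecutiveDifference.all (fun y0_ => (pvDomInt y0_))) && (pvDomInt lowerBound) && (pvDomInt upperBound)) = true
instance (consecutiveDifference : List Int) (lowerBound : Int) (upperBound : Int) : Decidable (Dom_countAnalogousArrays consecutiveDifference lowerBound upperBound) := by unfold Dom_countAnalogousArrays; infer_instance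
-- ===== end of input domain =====

-- B replaces A's forward prefix-sum min/max scan and final clamping arithmetic by a single
-- backward pass that maintains the feasible interval for the current array value,
-- intersecting it with [lowerBound, upperBound] at each step (objective: alternative).

-- ===== PORT A =====
-- A's loop state: (maxdiff, mindiff, runningsum); none plays float('-inf')/float('inf'),
-- against which the first comparison always succeeds, exactly as in Python.
def pvLoopA : List Int → (Option Int × Option Int × Int) → (Option Int × Option Int × Int)
  | [], st => st
  | d :: rest, (mx, mn, rs) =>
    let rs' := rs + d
    let mx' := match mx with
      | none => some rs'            -- runningsum > -inf
      | some m => if rs' > m then some rs' else some m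
    let mn' := match mn with
      | none => some rs'            -- runningsum < inf
      | some m => if rs' < m then some rs' else some m
    pvLoopA rest (mx', mn', rs')

def countAnalogousArrays (consecutiveDifference : List Int) (lowerBound : Int) (upperBound : Int) : Int :=
  if consecutiveDifference.length = 0 then 0
  else if upperBound < lowerBound then 0
  else
    let st := pvLoopA consecutiveDifference (none, none, 0)
    -- the list is nonempty here, so both options are some; .getD 0 is never hit with its default
    let maxdiff := st.1.getD 0
    let mindiff := st.2.1.getD 0
    let maxvalidupperbound := if upperBound + mindiff < upperBound then upperBound + mindiff else upperBound
    let minvalidlowerbound := if lowerBound + maxdiff > lowerBound then lowerBound + maxdiff else lowerBound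
    if maxvalidupperbound ≥ minvalidlowerbound then maxvalidupperbound - minvalidlowerbound + 1 else 0

-- ===== PORT B =====
-- Source B's 'for d in reversed(consecutiveDifference)' loop = foldl over the reversed list.
def countAnalogousArrays_alt (consecutiveDifference : List Int) (lowerBound : Int) (upperBound : Int) : Int :=
  if consecutiveDifference.isEmpty then 0
  else
    let p := consecutiveDifference.reverse.foldl
      (fun (p : Int × Int) d => (max lowerBound (p.1 + d), min upperBound (p.2 + d)))
      (lowerBound, upperBound)
    max 0 (p.2 - p.1 + 1)

-- ===== PRECONDITION & SPEC =====
def Spec_countAnalogousArrays (consecutiveDifference : List Int) (lowerBound : Int) (upperBound : Int) (out : Int) : Prop := out = countAnalogousArrays_alt consecutiveDifference lowerBound upperBound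
instance (consecutiveDifference : List Int) (lowerBound : Int) (upperBound : Int) (out : Int) : Decidable (Spec_countAnalogousArrays consecutiveDifference lowerBound upperBound out) := by unfold Spec_countAnalogousArrays; infer_instance

-- ===== CLAIM =====
def Claim_equal_countAnalogousArrays : Prop := ∀ (consecutiveDifference : List Int) (lowerBound : Int) (upperBound : Int), Dom_countAnalogousArrays consecutiveDifference lowerBound upperBound → Spec_countAnalogousArrays consecutiveDifference lowerBound upperBound (countAnalogousArrays consecutiveDifference lowerBound upperBound)

-- ===== LEMMAS AND PROOFS =====

-- running sums of cd starting from s (A's successive runningsum values)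
def pvSums : List Int → Int → List Int
  | [], _ => []
  | d :: r, s => (s + d) :: pvSums r (s + d)

-- max(0, largest prefix sum) and min(0, smallest prefix sum) of a list, recursively
def pvE : List Int → Int
  | [] => 0
  | d :: r => max 0 (d + pvE r)

def pvF : List Int → Int
  | [] => 0
  | d :: r => min 0 (d + pvF r)

lemma pvE_nonneg (cd : List Int) : 0 ≤ pvE cd := by
  cases cd <;> simp [pvE]

lemma pvF_nonpos (cd : List Int) : pvF cd ≤ 0 := by
  cases cd <;> simp [pvF]

lemma pvLoopA_some (cd : List Int) : ∀ (m n s : Int),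
    pvLoopA cd (some m, some n, s) =
      (some (List.foldl max m (pvSums cd s)), some (List.foldl min n (pvSums cd s)), s + cd.sum) := by
  induction cd with
  | nil => intro m n s; simp [pvLoopA, pvSums]
  | cons d r ih =>
    intro m n s
    simp only [pvLoopA, pvSums, List.foldl, List.sum_cons]
    have hmx : (if s + d > m then some (s + d) else some m) = some (max m (s + d)) := by
      split_ifs <;> simp <;> omega
    have hmn : (if s + d < n then some (s + d) else some n) = some (min n (s + d)) := by
      split_ifs <;> simp <;> omega
    rw [hmx, hmn, ih]
    simp [add_assoc]

lemma pvLoopA_start (d : Int) (r : List Int) :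
    pvLoopA (d :: r) (none, none, 0) =
      (some (List.foldl max d (pvSums r d)), some (List.foldl min d (pvSums r d)), d + r.sum) := by
  simp only [pvLoopA]
  have : (0 : Int) + d = d := by ring
  rw [this, pvLoopA_some]

lemma foldl_max_comm (l : List Int) : ∀ (a b : Int),
    List.foldl max (max a b) l = max a (List.foldl max b l) := by
  induction l with
  | nil => intro a b; rfl
  | cons c t ih =>
    intro a b
    simp only [List.foldl]
    rw [max_assoc, ih]

lemma foldl_min_comm (l : List Int) : ∀ (a b : Int),
    List.foldl min (min a b) l = min a (List.foldl min b l) := by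
  induction l with
  | nil => intro a b; rfl
  | cons c t ih =>
    intro a b
    simp only [List.foldl]
    rw [min_assoc, ih]

-- A's maxdiff over a nonempty list, in terms of pvE
lemma foldl_max_sums (r : List Int) : ∀ (s : Int),
    List.foldl max s (pvSums r s) = s + pvE r := by
  induction r with
  | nil => intro s; simp [pvSums, pvE]
  | cons d t ih =>
    intro s
    simp only [pvSums, List.foldl, pvE]
    rw [foldl_max_comm, ih]
    omega

lemma foldl_min_sums (r : List Int) : ∀ (s : Int),
    List.foldl min s (pvSums r s) = s + pvF r := by
  induction r with
  | nil => intro s; simp [pvSums, pvF]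
  | cons d t ih =>
    intro s
    simp only [pvSums, List.foldl, pvF]
    rw [foldl_min_comm, ih]
    omega

-- B's backward interval pass, in terms of pvE / pvF
lemma altFold_eq (cd : List Int) (lb ub : Int) :
    cd.reverse.foldl
      (fun (p : Int × Int) d => (max lb (p.1 + d), min ub (p.2 + d)))
      (lb, ub) = (lb + pvE cd, ub + pvF cd) := by
  rw [List.foldl_reverse]
  induction cd with
  | nil => simp [pvE, pvF]
  | cons d r ih =>
    simp only [List.foldr_cons, ih, pvE, pvF]
    refine Prod.ext ?_ ?_ <;> simp <;> omega

lemma countAnalogousArrays_eq (cd : List Int) (lb ub : Int) :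
    countAnalogousArrays cd lb ub = countAnalogousArrays_alt cd lb ub := by
  cases cd with
  | nil => simp [countAnalogousArrays, countAnalogousArrays_alt]
  | cons d r =>
    unfold countAnalogousArrays countAnalogousArrays_alt
    simp only [List.length_cons, List.isEmpty_cons, Nat.succ_ne_zero, Bool.false_eq_true,
      if_false, altFold_eq]
    rw [pvLoopA_start]
    simp only [Option.getD_some]
    rw [foldl_max_sums, foldl_min_sums]
    have hE : pvE (d :: r) = max 0 (d + pvE r) := rfl
    have hF : pvF (d :: r) = min 0 (d + pvF r) := rfl
    have hE0 : 0 ≤ pvE (d :: r) := pvE_nonneg _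
    have hF0 : pvF (d :: r) ≤ 0 := pvF_nonpos _
    by_cases h1 : ub < lb
    · rw [if_pos h1]
      omega
    · rw [if_neg h1]
      split_ifs <;> omega

-- ===== VERDICT =====
theorem countAnalogousArrays_spec : Claim_equal_countAnalogousArrays := by
  intro cd lb ub _
  unfold Spec_countAnalogousArrays
  exact countAnalogousArrays_eq cd lb ub
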